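-- pv_equiv track=rewrite | github.com/DongExxn/Algorithm | Python3/프로그래머스/1/140108. 문자열 나누기/문자열 나누기.py | solution
-- ===== SOURCE A (Python) =====
-- def solution(s):
--     answer = 0
--     a = 0
--     b = 0
--     for i in s:
--         if a == b:
--             answer += 1
--             S = i
--         if S == i:
--             a += 1
--         else:
--             b += 1
--
--     return answer
-- ===== SOURCE B (Python) =====
-- def _count_le(ps, x):
--     lo, hi = 0, len(ps)
--     while lo < hi:
--         mid = (lo + hi) // 2
--         if ps[mid] <= x:
--             lo = mid + 1
--         else:
--             hi = mid
--     return lo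
--
--
-- def solution(s):
--     n = len(s)
--     pos = {}
--     for i, ch in enumerate(s):
--         pos.setdefault(ch, []).append(i)
--     answer = 0
--     p = 0
--     while p < n:
--         answer += 1
--         ps = pos[s[p]]
--         base = _count_le(ps, p - 1)
--         m = 1
--         while True:
--             j = p + 2 * m - 1
--             if j >= n:
--                 p = n
--                 break
--             cnt = _count_le(ps, j) - base
--             if cnt == m:
--                 p = j + 1
--                 break
--             m = cnt
--     return answer
-- ===== Notes on version B (the rewrite author's own statement) =====
-- stated objective: alternative
-- what changed: B first builds an index of every character's occurrence positions, then locates each segment's end by jumping between candidate even-length endpoints (j = p+2m-1) and counting occurrences with binary search over the position list, instead of A's single character-by-character pass with two running match/mismatch counters.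
import Mathlib
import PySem

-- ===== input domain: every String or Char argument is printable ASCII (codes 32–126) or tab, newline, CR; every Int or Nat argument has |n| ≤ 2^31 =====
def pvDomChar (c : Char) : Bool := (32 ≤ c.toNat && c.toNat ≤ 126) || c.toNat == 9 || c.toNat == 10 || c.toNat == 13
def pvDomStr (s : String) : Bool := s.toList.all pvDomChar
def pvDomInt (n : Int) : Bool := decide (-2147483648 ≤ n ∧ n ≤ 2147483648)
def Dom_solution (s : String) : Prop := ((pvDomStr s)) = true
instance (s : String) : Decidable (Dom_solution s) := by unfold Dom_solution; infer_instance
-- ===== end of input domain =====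

-- B replaces A's single character-by-character pass (two running counters) by a position
-- index per character plus binary-search jumps between candidate segment endpoints; same
-- return value on every string ("alternative", no speed claim).

-- ===== PORT A =====
-- A's loop state: (answer, a, b, S); S starts unassigned in Python, modelled as Option Char
-- (it is assigned on the first iteration before ever being read, exactly as in Python).
def solutionStep (st : Int × Int × Int × Option Char) (i : Char) : Int × Int × Int × Option Char :=
  let (answer, a, b, S) := st
  let (answer, S) := if a = b then (answer + 1, some i) else (answer, S)
  if S = some i then (answer, a + 1, b, S) else (answer, a, b + 1, S)

def solution (s : String) : Int :=
  (s.toList.foldl solutionStep (0, 0, 0, none)).1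

-- ===== PORT B =====
-- Source B's `pos.setdefault(ch, []).append(i)` (append to the entry, inserting [] first if
-- absent) is exactly Dict.modify ch [] (· ++ [i]).
def posBuild (l : List (Int × Char)) (d : PySem.Dict Char (List Int)) : PySem.Dict Char (List Int) :=
  l.foldl (fun d p => d.modify p.2 [] (fun v => v ++ [p.1])) d

-- the while-loop of Source B's _count_le; ps[mid] is provably in range (0 ≤ lo ≤ mid < hi ≤ len),
-- so the pyGetD default is never used
def countLELoop (ps : List Int) (x lo hi : Int) : Int :=
  if h : lo < hi then
    let mid := PySem.Int.floordiv (lo + hi) 2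
    if PySem.List.pyGetD ps mid 0 ≤ x then countLELoop ps x (mid + 1) hi
    else countLELoop ps x lo mid
  else lo
termination_by (hi - lo).toNat
decreasing_by
  · have hb := PySem.Int.floordiv_two_mid_bounds (le_of_lt h)
    have h2 : PySem.Int.floordiv (lo + hi) 2 < hi := by
      rw [PySem.Int.floordiv_eq_ediv_of_pos (by omega : (0:Int) < 2)]; omega
    omega
  · have hb := PySem.Int.floordiv_two_mid_bounds (le_of_lt h)
    have h2 : lo ≤ PySem.Int.floordiv (lo + hi) 2 := hb.1
    have h3 : PySem.Int.floordiv (lo + hi) 2 < hi := by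
      rw [PySem.Int.floordiv_eq_ediv_of_pos (by omega : (0:Int) < 2)]; omega
    omega

def countLE (ps : List Int) (x : Int) : Int :=
  countLELoop ps x 0 (ps.length : Int)

-- inner `while True` of Source B: jump to the next candidate endpoint j = p + 2m - 1;
-- returns the updated p.  The fuel only makes the recursion structural: it is provably
-- never exhausted (m strictly increases each round), so the loop computes what Source B's does.
def innerLoop (ps : List Int) (n p base : Int) (m : Int) (fuel : Nat) : Int :=
  match fuel with
  | 0 => n
  | fuel + 1 =>
    let j := p + 2 * m - 1
    if n ≤ j then n
    else
      let cnt := countLE ps j - base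
      if cnt = m then j + 1
      else innerLoop ps n p base cnt fuel

-- outer `while p < n` of Source B; s[p] and pos[s[p]] are provably present (p in range, and
-- position p is an occurrence of s[p]), so the defaults are never used.  Fuel as above.
def outerLoop (l : List Char) (pos : PySem.Dict Char (List Int)) (n : Int)
    (answer p : Int) (fuel : Nat) : Int :=
  match fuel with
  | 0 => answer
  | fuel + 1 =>
    if p < n then
      let c := PySem.List.pyGetD l p ' '
      let ps := pos.getD c []
      let base := countLE ps (p - 1)
      let p' := innerLoop ps n p base 1 (l.length + 1)
      outerLoop l pos n (answer + 1) p' fuel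
    else answer

def solution_alt (s : String) : Int :=
  let l := s.toList
  let pos := posBuild (PySem.List.enumerate l 0) PySem.Dict.empty
  outerLoop l pos (l.length : Int) 0 0 (l.length + 1)

-- ===== PRECONDITION & SPEC =====
def Spec_solution (s : String) (out : Int) : Prop := out = solution_alt s
instance (s : String) (out : Int) : Decidable (Spec_solution s out) := by unfold Spec_solution; infer_instance

-- ===== CLAIM (what is proved, stated in full; the proofs are below) =====
def Claim_equal_solution : Prop := ∀ (s : String), Dom_solution s → Spec_solution s (solution s)

-- ===== LEMMAS AND PROOFS =====

-- ---- the common specification: the segment decomposition ----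
-- run the balance over l; return the suffix after it first hits 0, none otherwise
def segRest (first : Char) (bal : Int) (l : List Char) : Option (List Char) :=
  match l with
  | [] => none
  | x :: xs =>
    if bal + (if x = first then 1 else -1) = 0 then some xs
    else segRest first (bal + (if x = first then 1 else -1)) xs

theorem segRest_length {first : Char} {bal : Int} {l suf : List Char}
    (h : segRest first bal l = some suf) : suf.length < l.length := by
  induction l generalizing bal with
  | nil => simp [segRest] at h
  | cons x xs ih =>
    unfold segRest at h
    by_cases hb : bal + (if x = first then (1 : Int) else -1) = 0
    · rw [if_pos hb] at h
      cases h; simp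
    · rw [if_neg hb] at h
      exact Nat.lt_trans (ih h) (by simp)

def solutionSegs (l : List Char) : Int :=
  match l with
  | [] => 0
  | c :: rest =>
    match h : segRest c 1 rest with
    | none => 1
    | some suf => 1 + solutionSegs suf
termination_by l.length
decreasing_by exact Nat.lt_trans (segRest_length h) (by simp)

theorem solutionSegs_cons_none {c : Char} {rest : List Char}
    (h : segRest c 1 rest = none) : solutionSegs (c :: rest) = 1 := by
  rw [solutionSegs]; split <;> rename_i heq <;> simp_all

theorem solutionSegs_cons_some {c : Char} {rest suf : List Char}
    (h : segRest c 1 rest = some suf) : solutionSegs (c :: rest) = 1 + solutionSegs suf := by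
  rw [solutionSegs]; split <;> rename_i heq <;> simp_all

-- ---- A computes solutionSegs ----
-- A's fold starting from a balanced state (a = b) counts exactly the segments;
-- started mid-segment (a ≠ b, current letter S, balance a - b, the open segment already
-- counted) it adds the segment count of the suffix left after the balance first closes.
theorem fold_both (n : Nat) :
    ∀ l : List Char, l.length ≤ n →
      ((∀ (ans a b : Int) (S : Option Char), a = b →
          (l.foldl solutionStep (ans, a, b, S)).1 = ans + solutionSegs l) ∧
       (∀ (ans a b : Int) (S : Char), a ≠ b →
          (l.foldl solutionStep (ans, a, b, some S)).1
            = ans + (match segRest S (a - b) l with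
                     | none => 0
                     | some suf => solutionSegs suf))) := by
  induction n with
  | zero =>
    intro l hl
    have : l = [] := List.eq_nil_of_length_eq_zero (Nat.le_zero.mp hl)
    subst this
    constructor
    · intro ans a b S _; simp [solutionSegs]
    · intro ans a b S _; simp [segRest]
  | succ n ih =>
    intro l hl
    cases l with
    | nil =>
      constructor
      · intro ans a b S _; simp [solutionSegs]
      · intro ans a b S _; simp [segRest]
    | cons x xs =>
      have hxs : xs.length ≤ n := Nat.le_of_succ_le_succ hl
      constructor
      · intro ans a b S hab
        have hstep : solutionStep (ans, a, b, S) x = (ans + 1, a + 1, b, some x) := by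
          simp [solutionStep, hab]
        rw [List.foldl_cons, hstep]
        have hne : a + 1 ≠ b := by omega
        have hmid := (ih xs hxs).2 (ans + 1) (a + 1) b x hne
        have hd : a + 1 - b = 1 := by omega
        rw [hd] at hmid
        rw [hmid]
        cases hseg : segRest x 1 xs with
        | none => rw [solutionSegs_cons_none hseg]; ring
        | some suf => rw [solutionSegs_cons_some hseg]; ring
      · intro ans a b S hab
        have hstep : solutionStep (ans, a, b, some S) x
            = if S = x then (ans, a + 1, b, some S) else (ans, a, b + 1, some S) := by
          simp [solutionStep, hab]
        rw [List.foldl_cons, hstep]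
        by_cases hSx : S = x
        · simp only [if_pos hSx]
          have hxS : x = S := hSx.symm
          by_cases hz : a + 1 = b
          · rw [(ih xs hxs).1 ans (a + 1) b (some S) hz]
            have hseg : segRest S (a - b) (x :: xs) = some xs := by
              simp only [segRest, if_pos hxS]
              rw [if_pos (by omega)]
            rw [hseg]
          · rw [(ih xs hxs).2 ans (a + 1) b S hz]
            have hseg : segRest S (a - b) (x :: xs) = segRest S (a + 1 - b) xs := by
              simp only [segRest, if_pos hxS]
              rw [show a - b + 1 = a + 1 - b from by ring, if_neg (by omega)]
            rw [hseg]
        · simp only [if_neg hSx]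
          have hxS : ¬ x = S := fun h => hSx h.symm
          by_cases hz : a = b + 1
          · rw [(ih xs hxs).1 ans a (b + 1) (some S) hz]
            have hseg : segRest S (a - b) (x :: xs) = some xs := by
              simp only [segRest, if_neg hxS]
              rw [if_pos (by omega)]
            rw [hseg]
          · rw [(ih xs hxs).2 ans a (b + 1) S hz]
            have hseg : segRest S (a - b) (x :: xs) = segRest S (a - (b + 1)) xs := by
              simp only [segRest, if_neg hxS]
              rw [show a - b + -1 = a - (b + 1) from by ring, if_neg (by omega)]
            rw [hseg]

theorem solution_eq_segs (s : String) : solution s = solutionSegs s.toList := by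
  unfold solution
  rw [(fold_both s.toList.length s.toList le_rfl).1 0 0 0 none rfl]
  ring

-- ---- B computes solutionSegs ----

-- the positions (as Ints, offset by k) at which c occurs in l
def idxsFrom (k : Int) (c : Char) : List Char → List Int
  | [] => []
  | x :: xs => if x = c then k :: idxsFrom (k + 1) c xs else idxsFrom (k + 1) c xs

theorem mem_idxsFrom {c : Char} {q : Int} :
    ∀ (l : List Char) (k : Int), q ∈ idxsFrom k c l → k ≤ q ∧ q < k + l.length := by
  intro l
  induction l with
  | nil => intro k h; simp [idxsFrom] at h
  | cons x xs ih =>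
    intro k h
    simp only [idxsFrom] at h
    by_cases hx : x = c
    · rw [if_pos hx] at h
      rcases List.mem_cons.mp h with h | h
      · subst h; simp
      · have := ih (k + 1) h; simp at this ⊢; omega
    · rw [if_neg hx] at h
      have := ih (k + 1) h; simp at this ⊢; omega

theorem idxsFrom_pairwise (c : Char) :
    ∀ (l : List Char) (k : Int), (idxsFrom k c l).Pairwise (· < ·) := by
  intro l
  induction l with
  | nil => intro k; simp [idxsFrom]
  | cons x xs ih =>
    intro k
    simp only [idxsFrom]
    by_cases hx : x = c
    · rw [if_pos hx]
      refine List.Pairwise.cons ?_ (ih (k + 1))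
      intro q hq
      have := mem_idxsFrom xs (k + 1) hq
      omega
    · rw [if_neg hx]; exact ih (k + 1)

theorem posBuild_getD (c : Char) :
    ∀ (l : List Char) (k : Int) (d : PySem.Dict Char (List Int)),
      (posBuild (PySem.List.enumerate l k) d).getD c [] = d.getD c [] ++ idxsFrom k c l := by
  intro l
  induction l with
  | nil => intro k d; simp [idxsFrom, posBuild, PySem.List.enumerate_nil]
  | cons x xs ih =>
    intro k d
    rw [PySem.List.enumerate_cons]
    show (posBuild (PySem.List.enumerate xs (k + 1)) (d.modify x [] (fun v => v ++ [k]))).getD c []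
        = d.getD c [] ++ idxsFrom k c (x :: xs)
    rw [ih (k + 1)]
    simp only [idxsFrom]
    by_cases hx : x = c
    · subst hx
      rw [PySem.Dict.getD_modify_self, if_pos rfl, List.append_assoc]
      rfl
    · rw [PySem.Dict.getD_modify_of_ne, if_neg hx]
      exact fun h => hx h.symm

-- binary search counts the elements ≤ x of a strictly increasing list
theorem countLELoop_eq (ps : List Int) (x : Int) (hps : ps.Pairwise (· < ·)) :
    ∀ (lo hi : Int), 0 ≤ lo → lo ≤ hi → hi ≤ (ps.length : Int) →
      (∀ i : Nat, i < lo.toNat → (hi2 : i < ps.length) → ps[i] ≤ x) →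
      (∀ i : Nat, hi.toNat ≤ i → (hi2 : i < ps.length) → x < ps[i]) →
      countLELoop ps x lo hi = (ps.countP (fun q => decide (q ≤ x)) : Int) := by
  have hmono : ∀ (i j : Nat) (hij : i ≤ j) (hj : j < ps.length), ps[i]'(Nat.lt_of_le_of_lt hij hj) ≤ ps[j] := by
    intro i j hij hj
    rcases Nat.lt_or_ge i j with h | h
    · exact le_of_lt ((List.pairwise_iff_getElem.mp hps) i j (Nat.lt_of_le_of_lt hij hj) hj h)
    · have : i = j := by omega
      subst this; exact le_refl _
  have hfinal : ∀ lo : Int, 0 ≤ lo → lo ≤ (ps.length : Int) →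
      (∀ i : Nat, i < lo.toNat → (hi2 : i < ps.length) → ps[i] ≤ x) →
      (∀ i : Nat, lo.toNat ≤ i → (hi2 : i < ps.length) → x < ps[i]) →
      (ps.countP (fun q => decide (q ≤ x)) : Int) = lo := by
    intro lo h0 hlen hlow hhigh
    have hcnt : ps.countP (fun q => decide (q ≤ x)) = lo.toNat := by
      conv_lhs => rw [← List.take_append_drop lo.toNat ps]
      rw [List.countP_append]
      have h1 : (ps.take lo.toNat).countP (fun q => decide (q ≤ x)) = lo.toNat := by
        rw [List.countP_eq_length.mpr, List.length_take]
        · omega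
        · intro a ha
          rcases List.mem_iff_getElem.mp ha with ⟨i, hlt, heq⟩
          have hlt' : i < lo.toNat := by
            have := List.length_take (l := ps) (i := lo.toNat); omega
          have hilen : i < ps.length := by omega
          rw [List.getElem_take] at heq
          subst heq
          exact decide_eq_true (hlow i hlt' hilen)
      have h2 : (ps.drop lo.toNat).countP (fun q => decide (q ≤ x)) = 0 := by
        rw [List.countP_eq_zero]
        intro a ha
        rcases List.mem_iff_getElem.mp ha with ⟨i, hlt, heq⟩
        have hilen : lo.toNat + i < ps.length := by
          have := List.length_drop (i := lo.toNat) (l := ps); omega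
        rw [List.getElem_drop] at heq
        subst heq
        simp only [decide_eq_true_eq]
        exact not_le.mpr (hhigh (lo.toNat + i) (by omega) hilen)
      omega
    rw [hcnt]; omega
  have main : ∀ (N : Nat) (lo hi : Int), (hi - lo).toNat ≤ N → 0 ≤ lo → lo ≤ hi →
      hi ≤ (ps.length : Int) →
      (∀ i : Nat, i < lo.toNat → (hi2 : i < ps.length) → ps[i] ≤ x) →
      (∀ i : Nat, hi.toNat ≤ i → (hi2 : i < ps.length) → x < ps[i]) →
      countLELoop ps x lo hi = (ps.countP (fun q => decide (q ≤ x)) : Int) := by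
    intro N
    induction N with
    | zero =>
      intro lo hi hN h0 hlh hlen hlow hhigh
      have heq : lo = hi := by omega
      rw [countLELoop, dif_neg (by omega)]
      subst heq
      exact (hfinal lo h0 (by omega) hlow hhigh).symm
    | succ N ih =>
      intro lo hi hN h0 hlh hlen hlow hhigh
      rcases eq_or_lt_of_le hlh with heq | hlt
      · rw [countLELoop, dif_neg (by omega)]
        subst heq
        exact (hfinal lo h0 (by omega) hlow hhigh).symm
      · rw [countLELoop, dif_pos hlt]
        have hb := PySem.Int.floordiv_two_mid_bounds (le_of_lt hlt)
        have hmid2 : PySem.Int.floordiv (lo + hi) 2 < hi := by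
          rw [PySem.Int.floordiv_eq_ediv_of_pos (by omega : (0:Int) < 2)]; omega
        show (if PySem.List.pyGetD ps (PySem.Int.floordiv (lo + hi) 2) 0 ≤ x then
              countLELoop ps x (PySem.Int.floordiv (lo + hi) 2 + 1) hi
            else countLELoop ps x lo (PySem.Int.floordiv (lo + hi) 2)) = _
        set mid := PySem.Int.floordiv (lo + hi) 2 with hmid
        have hmlen : mid.toNat < ps.length := by omega
        have hget : PySem.List.pyGetD ps mid 0 = ps[mid.toNat] :=
          PySem.List.pyGetD_eq_getElem ps 0 (by omega) (by omega)
        rw [hget]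
        by_cases hle : ps[mid.toNat] ≤ x
        · rw [if_pos hle]
          refine ih (mid + 1) hi (by omega) (by omega) (by omega) hlen ?_ hhigh
          intro i hi1 hi2
          exact le_trans (hmono i mid.toNat (by omega) hmlen) hle
        · rw [if_neg hle]
          refine ih lo mid (by omega) h0 (by omega) (by omega) hlow ?_
          intro i hi1 hi2
          exact lt_of_not_ge fun hc => hle (le_trans (hmono mid.toNat i (by omega) hi2) hc)
  intro lo hi h0 hlh hlen hlow hhigh
  exact main (hi - lo).toNat lo hi (le_refl _) h0 hlh hlen hlow hhigh

theorem countLE_eq (ps : List Int) (x : Int) (hps : ps.Pairwise (· < ·)) :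
    countLE ps x = (ps.countP (fun q => decide (q ≤ x)) : Int) := by
  unfold countLE
  refine countLELoop_eq ps x hps 0 (ps.length : Int) (le_refl _) (by omega) (by omega) ?_ ?_
  · intro i h1 h2; omega
  · intro i h1 h2; omega

-- counting positions ≤ x in the index list = counting c in the corresponding prefix
theorem countP_idxsFrom (c : Char) :
    ∀ (l : List Char) (k x : Int), k ≤ x + 1 →
      ((idxsFrom k c l).countP (fun q => decide (q ≤ x)) : Int)
        = ((l.take (x + 1 - k).toNat).count c : Int) := by
  intro l
  induction l with
  | nil => intro k x hk; simp [idxsFrom]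
  | cons ch tl ih =>
    intro k x hk
    rcases eq_or_lt_of_le hk with heq | hlt
    · have h0 : (x + 1 - k).toNat = 0 := by omega
      rw [h0]
      have hz : (idxsFrom k c (ch :: tl)).countP (fun q => decide (q ≤ x)) = 0 := by
        rw [List.countP_eq_zero]
        intro q hq
        have := mem_idxsFrom (ch :: tl) k hq
        simp only [decide_eq_true_eq]
        omega
      simp [hz]
    · have hkx : k ≤ x := by omega
      have h1 : (x + 1 - k).toNat = (x - k).toNat + 1 := by omega
      rw [h1, List.take_succ_cons, List.count_cons]
      have h2 : (x - k).toNat = (x + 1 - (k + 1)).toNat := by omega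
      simp only [idxsFrom]
      by_cases hx : ch = c
      · rw [if_pos hx, List.countP_cons, h2]
        have hd : (decide (k ≤ x)) = true := decide_eq_true hkx
        have hbe : (ch == c) = true := beq_iff_eq.mpr hx
        simp only [hd, hbe, if_true]
        push_cast
        rw [ih (k + 1) x (by omega)]
      · rw [if_neg hx, h2, ih (k + 1) x (by omega)]
        have : (ch == c) = false := beq_eq_false_iff_ne.mpr hx
        simp [this]

-- the balance of the segment opened by c after consuming w characters of rest
def Bal (c : Char) (rest : List Char) (w : Nat) : Int :=
  1 + 2 * ((rest.take w).count c : Int) - w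

theorem bal_step (c : Char) (rest : List Char) (w : Nat) (h : w < rest.length) :
    Bal c rest (w + 1) = Bal c rest w + (if rest[w] = c then 1 else -1) := by
  unfold Bal
  rw [List.take_succ, List.getElem?_eq_getElem h]
  simp only [Option.toList_some, List.count_append]
  by_cases hc : rest[w] = c
  · have : (rest[w] == c) = true := beq_iff_eq.mpr hc
    simp [hc, List.count_singleton, this]
    push_cast; ring
  · have : (rest[w] == c) = false := beq_eq_false_iff_ne.mpr hc
    simp [hc, List.count_singleton, this]
    push_cast; ring

theorem bal_pos (c : Char) (rest : List Char) (W : Nat)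
    (hnz : ∀ w : Nat, 1 ≤ w → w ≤ W → w ≤ rest.length → Bal c rest w ≠ 0) :
    ∀ w : Nat, w ≤ W → w ≤ rest.length → 1 ≤ Bal c rest w := by
  intro w
  induction w with
  | zero => intro _ _; simp [Bal]
  | succ v ih =>
    intro hW hlen
    have hv := ih (by omega) (by omega)
    have hstep := bal_step c rest v (by omega)
    have hnz' := hnz (v + 1) (by omega) hW hlen
    split_ifs at hstep <;> omega

theorem bal_lip (c : Char) (rest : List Char) :
    ∀ (w1 w2 : Nat), w1 ≤ w2 → w2 ≤ rest.length →
      Bal c rest w1 - ((w2 : Int) - w1) ≤ Bal c rest w2 := by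
  intro w1 w2
  induction w2 with
  | zero => intro h _; have : w1 = 0 := by omega
            subst this; simp
  | succ v ih =>
    intro h hlen
    by_cases he : w1 = v + 1
    · subst he; simp
    · have hv := ih (by omega) (by omega)
      have hstep := bal_step c rest v (by omega)
      split_ifs at hstep <;> push_cast at * <;> omega

theorem segRest_none_of_bal (c : Char) :
    ∀ (t : List Char) (b : Int),
      (∀ w : Nat, 1 ≤ w → w ≤ t.length → b + 2 * ((t.take w).count c : Int) - w ≠ 0) →
      segRest c b t = none := by
  intro t
  induction t with
  | nil => intro b _; rfl
  | cons x xs ih =>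
    intro b h
    have hb1 : b + (if x = c then 1 else -1) = b + 2 * (((x :: xs).take 1).count c : Int) - 1 := by
      by_cases hx : x = c
      · have hbe : (x == c) = true := beq_iff_eq.mpr hx
        simp [hx, hbe]; ring
      · have hbe : (x == c) = false := beq_eq_false_iff_ne.mpr hx
        simp [hx, hbe]; ring
    rw [segRest, if_neg (by rw [hb1]; exact h 1 (by omega) (by simp))]
    refine ih (b + (if x = c then 1 else -1)) ?_
    intro w hw hwl
    have := h (w + 1) (by omega) (by simp; omega)
    rw [List.take_succ_cons, List.count_cons] at this
    by_cases hx : x = c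
    · have hbe : (x == c) = true := beq_iff_eq.mpr hx
      rw [if_pos hx]
      simp only [hbe, if_true] at this
      push_cast at this ⊢
      omega
    · have hbe : (x == c) = false := beq_eq_false_iff_ne.mpr hx
      rw [if_neg hx]
      simp only [hbe, if_false] at this
      push_cast at this ⊢
      omega

theorem segRest_some_of_bal (c : Char) :
    ∀ (t : List Char) (b : Int) (w : Nat), 1 ≤ w → w ≤ t.length →
      b + 2 * ((t.take w).count c : Int) - w = 0 →
      (∀ v : Nat, 1 ≤ v → v < w → b + 2 * ((t.take v).count c : Int) - v ≠ 0) →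
      segRest c b t = some (t.drop w) := by
  intro t
  induction t with
  | nil => intro b w hw hwl _ _; simp at hwl; omega
  | cons x xs ih =>
    intro b w hw hwl h0 hmin
    have hb1 : b + (if x = c then 1 else -1) = b + 2 * (((x :: xs).take 1).count c : Int) - 1 := by
      by_cases hx : x = c
      · have hbe : (x == c) = true := beq_iff_eq.mpr hx
        simp [hx, hbe]; ring
      · have hbe : (x == c) = false := beq_eq_false_iff_ne.mpr hx
        simp [hx, hbe]; ring
    match w, hw with
    | 1, _ =>
      have hz : b + (if x = c then 1 else -1) = 0 := by
        rw [hb1]; exact h0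
      rw [segRest, if_pos hz]
      simp
    | (v + 2), _ =>
      have hnz1 : b + (if x = c then 1 else -1) ≠ 0 := by
        rw [hb1]; exact hmin 1 (by omega) (by omega)
      rw [segRest, if_neg hnz1]
      have hshift : ∀ u : Nat,
          b + (if x = c then 1 else -1) + 2 * ((xs.take u).count c : Int) - u
            = b + 2 * (((x :: xs).take (u + 1)).count c : Int) - (u + 1) := by
        intro u
        rw [List.take_succ_cons, List.count_cons]
        by_cases hx : x = c
        · have hbe : (x == c) = true := beq_iff_eq.mpr hx
          simp [hx, hbe]; push_cast; ring
        · have hbe : (x == c) = false := beq_eq_false_iff_ne.mpr hx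
          simp [hx, hbe]; push_cast; ring
      have := ih (b + (if x = c then 1 else -1)) (v + 1) (by omega)
        (by simp at hwl; omega)
        (by rw [hshift (v + 1)]; exact_mod_cast h0)
        (by intro u hu huw
            rw [hshift u]
            exact_mod_cast hmin (u + 1) (by omega) (by omega))
      rw [this]
      simp

-- the inner jump loop finds exactly the boundary segRest finds
theorem inner_eq (c : Char) (rest : List Char) (ps : List Int) (n p base : Int)
    (hn : n = p + 1 + rest.length)
    (hcnt : ∀ j : Int, p ≤ j → j < n →
      countLE ps j - base = 1 + ((rest.take (j - p).toNat).count c : Int)) :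
    ∀ (fuel : Nat) (m : Int), 1 ≤ m →
      (∀ w : Nat, 1 ≤ w → (w : Int) ≤ 2 * m - 2 → w ≤ rest.length → Bal c rest w ≠ 0) →
      ((rest.length : Int) + 2 - m ≤ fuel) →
      innerLoop ps n p base m fuel =
        (match segRest c 1 rest with
         | none => n
         | some suf => p + ((rest.length - suf.length : Nat) : Int) + 1) := by
  intro fuel
  induction fuel with
  | zero =>
    intro m hm hnz hfuel
    have hnone : segRest c 1 rest = none := by
      apply segRest_none_of_bal
      intro w hw hwl
      exact hnz w hw (by push_cast at hfuel ⊢; omega) hwl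
    rw [hnone]
    rfl
  | succ fuel ih =>
    intro m hm hnz hfuel
    show (if n ≤ p + 2 * m - 1 then n
          else if countLE ps (p + 2 * m - 1) - base = m then (p + 2 * m - 1) + 1
          else innerLoop ps n p base (countLE ps (p + 2 * m - 1) - base) fuel) = _
    by_cases hjn : n ≤ p + 2 * m - 1
    · rw [if_pos hjn]
      have hnone : segRest c 1 rest = none := by
        apply segRest_none_of_bal
        intro w hw hwl
        exact hnz w hw (by push_cast; omega) hwl
      rw [hnone]
    · rw [if_neg hjn]
      have hwlen : 2 * m - 1 ≤ (rest.length : Int) := by omega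
      set w : Nat := (2 * m - 1).toNat with hwdef
      have hwi : (w : Int) = 2 * m - 1 := by omega
      have hwl : w ≤ rest.length := by omega
      have hcnt' := hcnt (p + 2 * m - 1) (by omega) (by omega)
      have harg : (p + 2 * m - 1 - p).toNat = w := by omega
      rw [harg] at hcnt'
      set cnt : Int := countLE ps (p + 2 * m - 1) - base with hcdef
      have hbalw : Bal c rest w = 2 * (cnt - m) := by
        unfold Bal
        rw [hcnt']
        push_cast
        omega
      by_cases hcm : cnt = m
      · rw [if_pos hcm]
        have hsome : segRest c 1 rest = some (rest.drop w) := by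
          apply segRest_some_of_bal c rest 1 w (by omega) hwl
          · have : Bal c rest w = 0 := by rw [hbalw, hcm]; ring
            unfold Bal at this; push_cast at this ⊢; omega
          · intro v hv hvw
            have := hnz v hv (by omega) (by omega)
            unfold Bal at this; push_cast at this ⊢; omega
        rw [hsome]
        show p + 2 * m - 1 + 1
            = p + ((rest.length - (List.drop w rest).length : Nat) : Int) + 1
        have hdl : (List.drop w rest).length = rest.length - w := List.length_drop
        rw [hdl]
        omega
      · rw [if_neg hcm]
        have hcntge : m + 1 ≤ cnt := by
          have hnz' : ∀ v : Nat, 1 ≤ v → v ≤ (2 * m - 2).toNat → v ≤ rest.length →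
              Bal c rest v ≠ 0 := by
            intro v h1 h2 h3
            exact hnz v h1 (by omega) h3
          have hB : 1 ≤ Bal c rest (w - 1) :=
            bal_pos c rest (2 * m - 2).toNat hnz' (w - 1) (by omega) (by omega)
          have hstep := bal_step c rest (w - 1) (by omega)
          have hw1 : w - 1 + 1 = w := by omega
          rw [hw1] at hstep
          have hzero : Bal c rest w ≠ 0 := by rw [hbalw]; omega
          split_ifs at hstep <;> omega
        have hnz2 : ∀ v : Nat, 1 ≤ v → (v : Int) ≤ 2 * cnt - 2 → v ≤ rest.length →
            Bal c rest v ≠ 0 := by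
          intro v h1 h2 h3
          by_cases hv : (v : Int) ≤ 2 * m - 2
          · exact hnz v h1 hv h3
          · have hwv : w ≤ v := by omega
            have := bal_lip c rest w v hwv h3
            rw [hbalw] at this
            omega
        have := ih cnt (by omega) hnz2 (by omega)
        rw [hcdef] at this
        exact this

theorem segRest_drop {c : Char} {b : Int} :
    ∀ {t suf : List Char}, segRest c b t = some suf → suf = t.drop (t.length - suf.length) := by
  intro t
  induction t generalizing b with
  | nil => intro suf h; simp [segRest] at h
  | cons x xs ih =>
    intro suf h
    rw [segRest] at h
    by_cases hz : b + (if x = c then 1 else -1) = 0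
    · rw [if_pos hz] at h
      cases h
      simp
    · rw [if_neg hz] at h
      have hlt := segRest_length h
      have hih := ih h
      have harith : (x :: xs).length - suf.length = (xs.length - suf.length) + 1 := by
        simp; omega
      rw [harith, List.drop_succ_cons]
      exact hih

theorem outer_eq (l : List Char) :
    ∀ (fuel : Nat) (answer p : Int), 0 ≤ p → p ≤ (l.length : Int) →
      ((l.length : Int) - p).toNat < fuel →
      outerLoop l (posBuild (PySem.List.enumerate l 0) PySem.Dict.empty) (l.length : Int)
          answer p fuel
        = answer + solutionSegs (l.drop p.toNat) := by
  intro fuel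
  induction fuel with
  | zero => intro answer p _ _ hfuel; omega
  | succ fuel ih =>
    intro answer p h0 hpn hfuel
    by_cases hp : p < (l.length : Int)
    · have hplen : p.toNat < l.length := by omega
      have hcget : PySem.List.pyGetD l p ' ' = l[p.toNat] :=
        PySem.List.pyGetD_eq_getElem l ' ' h0 (by omega)
      have hdropp : l.drop p.toNat = l[p.toNat] :: l.drop (p.toNat + 1) :=
        List.drop_eq_getElem_cons hplen
      have hrlen : (l.drop (p.toNat + 1)).length = l.length - (p.toNat + 1) :=
        List.length_drop
      have hps : (posBuild (PySem.List.enumerate l 0) PySem.Dict.empty).getD l[p.toNat] []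
          = idxsFrom 0 l[p.toNat] l := by
        rw [posBuild_getD]
        have : (PySem.Dict.empty : PySem.Dict Char (List Int)).getD l[p.toNat] [] = [] := rfl
        rw [this, List.nil_append]
      have hpair := idxsFrom_pairwise l[p.toNat] l 0
      -- counting elements ≤ y of the index list = counting c in the prefix of length y+1
      have hcle : ∀ y : Int, 0 ≤ y + 1 →
          countLE (idxsFrom 0 l[p.toNat] l) y
            = ((l.take (y + 1).toNat).count l[p.toNat] : Int) := by
        intro y hy
        rw [countLE_eq _ _ hpair, countP_idxsFrom l[p.toNat] l 0 y (by omega)]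
        norm_num
      -- the prefix split: for p ≤ j, count over take (j+1) minus count over take p
      have hsplit : ∀ j : Int, p ≤ j → j < (l.length : Int) →
          ((l.take (j + 1).toNat).count l[p.toNat] : Int)
            = ((l.take p.toNat).count l[p.toNat] : Int) + 1
              + (((l.drop (p.toNat + 1)).take (j - p).toNat).count l[p.toNat] : Int) := by
        intro j hj hjn
        generalize hch : l[p.toNat] = ch
        rw [hch] at hdropp
        conv_lhs => rw [← List.take_append_drop p.toNat l]
        rw [List.take_append, hdropp]
        have hlt : (l.take p.toNat).length = p.toNat := by
          rw [List.length_take]; omega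
        rw [List.take_of_length_le (by omega), hlt]
        have h1 : (j + 1).toNat - p.toNat = ((j - p).toNat + 1) := by omega
        rw [h1, List.take_succ_cons, List.count_append, List.count_cons]
        have hbe : (ch == ch) = true := beq_iff_eq.mpr rfl
        simp only [hbe, if_true]
        push_cast
        ring
      have hn' : (l.length : Int) = p + 1 + ((l.drop (p.toNat + 1)).length : Int) := by
        rw [hrlen]; omega
      have hcnt : ∀ j : Int, p ≤ j → j < (l.length : Int) →
          countLE (idxsFrom 0 l[p.toNat] l) j
              - countLE (idxsFrom 0 l[p.toNat] l) (p - 1)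
            = 1 + (((l.drop (p.toNat + 1)).take (j - p).toNat).count l[p.toNat] : Int) := by
        intro j hj hjn
        rw [hcle j (by omega), hcle (p - 1) (by omega), hsplit j hj hjn]
        have : (p - 1 + 1).toNat = p.toNat := by omega
        rw [this]
        ring
      have hinner := inner_eq l[p.toNat] (l.drop (p.toNat + 1)) (idxsFrom 0 l[p.toNat] l)
        (l.length : Int) p (countLE (idxsFrom 0 l[p.toNat] l) (p - 1)) hn' hcnt
        (l.length + 1) 1 (le_refl 1) (by intro w h1 h2 _; omega) (by push_cast; omega)
      rw [outerLoop, if_pos hp]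
      show outerLoop l (posBuild (PySem.List.enumerate l 0) PySem.Dict.empty) (l.length : Int)
          (answer + 1)
          (innerLoop ((posBuild (PySem.List.enumerate l 0) PySem.Dict.empty).getD
              (PySem.List.pyGetD l p ' ') [])
            (l.length : Int) p
            (countLE ((posBuild (PySem.List.enumerate l 0) PySem.Dict.empty).getD
              (PySem.List.pyGetD l p ' ') []) (p - 1))
            1 (l.length + 1))
          fuel = answer + solutionSegs (l.drop p.toNat)
      rw [hcget, hps, hinner, hdropp]
      cases hseg : segRest l[p.toNat] 1 (l.drop (p.toNat + 1)) with
      | none =>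
        rw [solutionSegs_cons_none hseg]
        rw [ih (answer + 1) (l.length : Int) (by omega) (by omega) (by omega)]
        have : ((l.length : Int)).toNat = l.length := by omega
        rw [this, List.drop_length]
        show answer + 1 + solutionSegs [] = answer + 1
        rw [show solutionSegs ([] : List Char) = 0 from by rw [solutionSegs]]
        ring
      | some suf =>
        have hsufl := segRest_length hseg
        have hsufdrop := segRest_drop hseg
        set w : Nat := (l.drop (p.toNat + 1)).length - suf.length with hwdef
        have hw1 : 1 ≤ w := by omega
        have hp' : (p + (w : Int) + 1).toNat = p.toNat + 1 + w := by omega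
        rw [solutionSegs_cons_some hseg]
        rw [ih (answer + 1) (p + (w : Int) + 1) (by omega) (by omega) (by omega)]
        rw [hp']
        have hdrop2 : l.drop (p.toNat + 1 + w) = suf := by
          rw [← List.drop_drop, ← hsufdrop]
        rw [hdrop2]
        ring
    · rw [outerLoop, if_neg hp]
      rw [show p.toNat = l.length from by omega, List.drop_length]
      rw [show solutionSegs ([] : List Char) = 0 from by rw [solutionSegs]]
      ring

theorem alt_eq_segs (s : String) : solution_alt s = solutionSegs s.toList := by
  show outerLoop s.toList (posBuild (PySem.List.enumerate s.toList 0) PySem.Dict.empty)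
      (s.toList.length : Int) 0 0 (s.toList.length + 1) = solutionSegs s.toList
  rw [outer_eq s.toList (s.toList.length + 1) 0 0 (le_refl 0) (by omega) (by omega)]
  simp

-- ===== VERDICT (by name: the statement is the Claim_ definition above) =====
theorem solution_spec : Claim_equal_solution := by
  intro s _
  unfold Spec_solution
  rw [solution_eq_segs, alt_eq_segs]
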